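-- pv_equiv track=rewrite | github.com/goracle/dirichlet-divisor-conjecture | gauss_circle_conjecture/identities_verification/identity.py | gaussian_divisors_bounded
-- ===== SOURCE A (Python) =====
-- import math
--
-- def gaussian_divisors_bounded(Y, X):
--     # LHS
--     lhs = 0
--     Rb = int(math.isqrt(Y))
--     Ra = int(math.isqrt(X))
--
--     betas = []
--     for a in range(-Rb, Rb+1):
--         for b in range(-Rb, Rb+1):
--             if 0 < a*a+b*b <= Y:
--                 betas.append((a,b))
--
--     alphas = []
--     for a in range(-Ra, Ra+1):
--         for b in range(-Ra, Ra+1):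
--             if 0 < a*a+b*b <= X:
--                 alphas.append((a,b))
--
--     # count divisors
--     for (ba,bb) in betas:
--         for (aa,ab) in alphas:
--             # check divisibility
--             denom = aa*aa + ab*ab
--             if denom == 0:
--                 continue
--             # compute gamma = beta / alpha
--             num_re = ba*aa + bb*ab
--             num_im = bb*aa - ba*ab
--             if num_re % denom == 0 and num_im % denom == 0:
--                 lhs += 1
--
--     # RHS
--     rhs = 0
--     for (aa,ab) in alphas:
--         for (ba,bb) in betas:
--             # compute gamma = beta / alpha
--             denom = aa*aa + ab*ab
--             if denom == 0:
--                 continue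
--             num_re = ba*aa + bb*ab
--             num_im = bb*aa - ba*ab
--             if num_re % denom == 0 and num_im % denom == 0:
--                 rhs += 1
--
--     return lhs, rhs
-- ===== SOURCE B (Python) =====
-- import math
--
-- def gaussian_divisors_bounded(Y, X):
--     # A multiple beta of alpha with 0 < N(beta) <= Y corresponds exactly to a
--     # quotient gamma != 0 with N(gamma) <= Y // N(alpha), so per alpha the
--     # divisor count is G(Y // N(alpha)) where G(t) = #{z != 0 : N(z) <= t}.
--     # Tally lattice points of norm <= Y by norm, prefix-sum to get G, then
--     # sum G(Y // N(alpha)) over the alphas.  lhs == rhs by symmetry of the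
--     # pair count, so the pair (c, c) is returned.
--     RY = math.isqrt(Y)
--     cnt = {}
--     for a in range(-RY, RY + 1):
--         for b in range(-RY, RY + 1):
--             n = a * a + b * b
--             if 0 < n <= Y:
--                 cnt[n] = cnt.get(n, 0) + 1
--     G = [0]
--     total = 0
--     for m in range(1, Y + 1):
--         total += cnt.get(m, 0)
--         G.append(total)
--     RX = math.isqrt(X)
--     c = 0
--     for a in range(-RX, RX + 1):
--         for b in range(-RX, RX + 1):
--             n = a * a + b * b
--             if 0 < n <= X:
--                 c += G[Y // n]
--     return c, c
-- ===== Notes on version B (the rewrite author's own statement) =====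
-- stated objective: faster
-- what changed: Replaces the quadratic all-pairs divisibility scan (run twice, once per orientation) by a norm-histogram with prefix sums: beta is a multiple of alpha iff beta = alpha*gamma with 0 < N(gamma) <= Y // N(alpha), so each alpha contributes G(Y // N(alpha)) where G is the prefix count of nonzero lattice points by norm; lhs = rhs by symmetry so the count is computed once.
import Mathlib
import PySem

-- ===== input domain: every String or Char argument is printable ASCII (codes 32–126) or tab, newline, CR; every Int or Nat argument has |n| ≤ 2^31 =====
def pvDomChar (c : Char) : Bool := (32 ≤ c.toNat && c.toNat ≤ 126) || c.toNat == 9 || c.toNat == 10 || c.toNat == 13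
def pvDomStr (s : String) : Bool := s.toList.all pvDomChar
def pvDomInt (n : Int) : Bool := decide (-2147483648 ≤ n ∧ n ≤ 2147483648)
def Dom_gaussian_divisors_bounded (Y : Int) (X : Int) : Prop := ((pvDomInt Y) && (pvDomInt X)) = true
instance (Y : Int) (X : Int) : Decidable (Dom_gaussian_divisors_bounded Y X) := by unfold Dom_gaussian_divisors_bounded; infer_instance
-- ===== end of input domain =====

-- B replaces A's quadratic all-pairs divisibility scan (run in both orientations) by a
-- norm-histogram with prefix sums: each divisor alpha contributes G(Y // N(alpha)) quotients,
-- where G is the prefix count of nonzero lattice points by norm (objective: faster).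


-- math.isqrt(n): exact for 0 ≤ n (guaranteed by Pre_); Python raises ValueError on n < 0.
def pyIsqrt (n : Int) : Int := (Nat.sqrt n.toNat : Int)

-- ===== PORT A =====
def gaussian_divisors_bounded (Y : Int) (X : Int) : Int × Int :=
  let Rb := pyIsqrt Y
  let Ra := pyIsqrt X
  let betas : List (Int × Int) :=
    (PySem.List.pyRange (-Rb) (Rb + 1) 1).foldl (fun acc a =>
      (PySem.List.pyRange (-Rb) (Rb + 1) 1).foldl (fun acc b =>
        if 0 < a * a + b * b ∧ a * a + b * b ≤ Y then acc ++ [(a, b)] else acc) acc) []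
  let alphas : List (Int × Int) :=
    (PySem.List.pyRange (-Ra) (Ra + 1) 1).foldl (fun acc a =>
      (PySem.List.pyRange (-Ra) (Ra + 1) 1).foldl (fun acc b =>
        if 0 < a * a + b * b ∧ a * a + b * b ≤ X then acc ++ [(a, b)] else acc) acc) []
  let lhs : Int :=
    betas.foldl (fun lhs β =>
      alphas.foldl (fun lhs α =>
        let denom := α.1 * α.1 + α.2 * α.2
        if denom = 0 then lhs
        else
          let numRe := β.1 * α.1 + β.2 * α.2
          let numIm := β.2 * α.1 - β.1 * α.2
          if PySem.Int.mod numRe denom = 0 ∧ PySem.Int.mod numIm denom = 0 then lhs + 1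
          else lhs) lhs) 0
  let rhs : Int :=
    alphas.foldl (fun rhs α =>
      betas.foldl (fun rhs β =>
        let denom := α.1 * α.1 + α.2 * α.2
        if denom = 0 then rhs
        else
          let numRe := β.1 * α.1 + β.2 * α.2
          let numIm := β.2 * α.1 - β.1 * α.2
          if PySem.Int.mod numRe denom = 0 ∧ PySem.Int.mod numIm denom = 0 then rhs + 1
          else rhs) rhs) 0
  (lhs, rhs)

-- ===== PORT B =====
def gaussian_divisors_bounded_alt (Y : Int) (X : Int) : Int × Int :=
  let RY := pyIsqrt Y
  let cnt : PySem.Dict Int Int :=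
    (PySem.List.pyRange (-RY) (RY + 1) 1).foldl (fun d a =>
      (PySem.List.pyRange (-RY) (RY + 1) 1).foldl (fun d b =>
        let n := a * a + b * b
        if 0 < n ∧ n ≤ Y then d.insert n (d.getD n 0 + 1) else d) d) PySem.Dict.empty
  -- the loop 'G = [0]; total = 0; for m in …: total += …; G.append(total)' carries (G, total)
  let GT : List Int × Int :=
    (PySem.List.pyRange 1 (Y + 1) 1).foldl (fun st m =>
      let total := st.2 + cnt.getD m 0
      (st.1 ++ [total], total)) ([0], 0)
  let G := GT.1
  let RX := pyIsqrt X
  let c : Int :=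
    (PySem.List.pyRange (-RX) (RX + 1) 1).foldl (fun c a =>
      (PySem.List.pyRange (-RX) (RX + 1) 1).foldl (fun c b =>
        let n := a * a + b * b
        if 0 < n ∧ n ≤ X then
          -- G[Y // n]: the index is provably in range (0 ≤ Y // n ≤ Y), so pyGetD = the Python read
          c + PySem.List.pyGetD G (PySem.Int.floordiv Y n) 0
        else c) c) 0
  (c, c)

-- ===== PRECONDITION & SPEC =====
-- Pre_ excludes exactly the inputs where math.isqrt raises ValueError (negative Y or X): A returns nowhere outside Pre_.
def Pre_gaussian_divisors_bounded (Y : Int) (X : Int) : Prop := 0 ≤ Y ∧ 0 ≤ X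
instance (Y : Int) (X : Int) : Decidable (Pre_gaussian_divisors_bounded Y X) := by unfold Pre_gaussian_divisors_bounded; infer_instance
def pvWitness_gaussian_divisors_bounded : Int × Int := (10, 5)

def Spec_gaussian_divisors_bounded (Y : Int) (X : Int) (out : Int × Int) : Prop := out = gaussian_divisors_bounded_alt Y X
instance (Y : Int) (X : Int) (out : Int × Int) : Decidable (Spec_gaussian_divisors_bounded Y X out) := by unfold Spec_gaussian_divisors_bounded; infer_instance

-- ===== CLAIM (what is proved, stated in full; the proofs are below) =====
def Claim_equal_gaussian_divisors_bounded : Prop := ∀ (Y : Int) (X : Int), Dom_gaussian_divisors_bounded Y X → Pre_gaussian_divisors_bounded Y X → Spec_gaussian_divisors_bounded Y X (gaussian_divisors_bounded Y X)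

-- ===== LEMMAS AND PROOFS =====

def nrm (p : Int × Int) : Int := p.1 * p.1 + p.2 * p.2
def pts (m : Int) : List (Int × Int) :=
  (PySem.List.pyRange (-(pyIsqrt m)) (pyIsqrt m + 1) 1).flatMap (fun a =>
    ((PySem.List.pyRange (-(pyIsqrt m)) (pyIsqrt m + 1) 1).filter
      (fun b => decide (0 < a * a + b * b ∧ a * a + b * b ≤ m))).map (fun b => (a, b)))
def cntD (Y : Int) : PySem.Dict Int Int :=
  ((pts Y).map nrm).foldl (fun d n => d.insert n (d.getD n 0 + 1)) PySem.Dict.empty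
-- B's histogram loop builds cntD
lemma cnt_build_eq (Y : Int) :
    (PySem.List.pyRange (-(pyIsqrt Y)) (pyIsqrt Y + 1) 1).foldl (fun d a =>
      (PySem.List.pyRange (-(pyIsqrt Y)) (pyIsqrt Y + 1) 1).foldl (fun d b =>
        if 0 < a * a + b * b ∧ a * a + b * b ≤ Y then
          d.insert (a * a + b * b) (d.getD (a * a + b * b) 0 + 1) else d) d)
      PySem.Dict.empty = cntD Y := by
  unfold cntD pts
  rw [List.foldl_map, List.foldl_flatMap]
  apply PySem.List.foldl_congr_mem
  intro d a _
  rw [List.foldl_map, List.foldl_filter]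
  apply PySem.List.foldl_congr_mem
  intro d b _
  simp only [nrm, decide_eq_true_iff]

lemma cntD_getD (Y n : Int) :
    (cntD Y).getD n 0 = ((pts Y).countP (fun p => nrm p == n) : Int) := by
  unfold cntD
  rw [PySem.Dict.getD_foldl_insert_add_one]
  simp only [List.count_eq_countP, List.countP_map]
  have : PySem.Dict.empty.getD n (0:Int) = 0 := by simp [pysem]
  rw [this, zero_add]
  rfl

def Sg (g : Int → Int) (t : Int) : Int := ((PySem.List.pyRange 1 (t + 1) 1).map g).sum

lemma Sg_zero (g : Int → Int) : Sg g 0 = 0 := by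
  simp [Sg]

lemma Sg_succ (g : Int → Int) (t : Int) (ht : 0 ≤ t) :
    Sg g (t + 1) = Sg g t + g (t + 1) := by
  unfold Sg
  rw [PySem.List.pyRange_one_succ_right (by omega : (1:Int) ≤ t + 1)]
  simp

lemma G_fold (g : Int → Int) (n : Nat) :
    ((PySem.List.pyRange 1 ((n : Int) + 1) 1).foldl (fun st m =>
      (st.1 ++ [st.2 + g m], st.2 + g m)) (([0] : List Int), (0 : Int)))
      = ((PySem.List.pyRange 0 ((n : Int) + 1) 1).map (Sg g), Sg g (n : Int)) := by
  induction n with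
  | zero =>
    rw [show ((0:Nat):Int) = 0 from rfl,
      PySem.List.pyRange_one_eq_nil (by omega : (0:Int) + 1 ≤ 1),
      PySem.List.pyRange_one_singleton]
    simp [Sg_zero]
  | succ n ih =>
    rw [show (((n+1:Nat)):Int) + 1 = ((n:Int) + 1) + 1 from by push_cast; ring,
      PySem.List.pyRange_one_succ_right (a := 1) (by omega),
      PySem.List.pyRange_one_succ_right (a := 0) (by omega),
      List.foldl_append, ih, List.map_append]
    simp only [List.foldl_cons, List.foldl_nil, List.map_cons, List.map_nil]
    rw [show (((n+1:Nat)):Int) = (n:Int) + 1 from by push_cast; ring,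
      Sg_succ _ _ (by omega)]

lemma G_eq (Y : Int) (hY : 0 ≤ Y) :
    ((PySem.List.pyRange 1 (Y + 1) 1).foldl (fun st m =>
      (st.1 ++ [st.2 + (cntD Y).getD m 0], st.2 + (cntD Y).getD m 0)) (([0] : List Int), (0 : Int)))
      = ((PySem.List.pyRange 0 (Y + 1) 1).map (Sg (fun m => (cntD Y).getD m 0)),
          Sg (fun m => (cntD Y).getD m 0) Y) := by
  obtain ⟨k, rfl⟩ : ∃ k : Nat, Y = (k : Int) := ⟨Y.toNat, by omega⟩
  exact G_fold _ k

lemma countP_card {l : List (Int × Int)} (hl : l.Nodup) (q : Int × Int → Bool) :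
    (l.countP q : Int) = ((l.toFinset.filter (fun x => q x)).card : Int) := by
  rw [← List.toFinset_filter, List.toFinset_card_of_nodup (hl.filter q),
    List.countP_eq_length_filter]

lemma sq_le_isqrt {m a : Int} (hm : 0 ≤ m) (h : a * a ≤ m) :
    -(pyIsqrt m) ≤ a ∧ a < pyIsqrt m + 1 := by
  have h1 : a.natAbs * a.natAbs ≤ m.toNat := by
    have := Int.natAbs_mul_self (a := a); omega
  have h2 : a.natAbs ≤ Nat.sqrt m.toNat := Nat.le_sqrt.mpr h1
  unfold pyIsqrt; omega

lemma mem_pts {m : Int} (hm : 0 ≤ m) (p : Int × Int) :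
    p ∈ pts m ↔ 0 < nrm p ∧ nrm p ≤ m := by
  obtain ⟨a, b⟩ := p
  simp only [pts, List.mem_flatMap, List.mem_map, List.mem_filter,
    PySem.List.mem_pyRange_one, decide_eq_true_iff, nrm]
  constructor
  · rintro ⟨a', _, b', ⟨_, hb⟩, h⟩
    cases h
    exact hb
  · rintro ⟨h1, h2⟩
    have ha : a * a ≤ m := by nlinarith
    have hb : b * b ≤ m := by nlinarith
    exact ⟨a, sq_le_isqrt hm ha, b, ⟨sq_le_isqrt hm hb, h1, h2⟩, rfl⟩

lemma nodup_pts (m : Int) : (pts m).Nodup := by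
  unfold pts
  rw [List.nodup_flatMap]
  refine ⟨fun a _ => ?_, ?_⟩
  · exact ((PySem.List.nodup_pyRange_one _ _).filter _).map (fun b b' h => congrArg Prod.snd h)
  · refine (PySem.List.nodup_pyRange_one _ _).imp ?_
    intro a a' hne x h1 h2
    simp only [List.mem_map, List.mem_filter] at h1 h2
    obtain ⟨b, _, rfl⟩ := h1
    obtain ⟨b', _, h⟩ := h2
    exact hne (congrArg Prod.fst h).symm

lemma Sg_eq_card (Y t : Int) (hY : 0 ≤ Y) (ht : 0 ≤ t) :
    Sg (fun m => (cntD Y).getD m 0) t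
      = (((pts Y).toFinset.filter (fun γ => nrm γ ≤ t)).card : Int) := by
  obtain ⟨k, rfl⟩ : ∃ k : Nat, t = (k : Int) := ⟨t.toNat, by omega⟩
  induction k with
  | zero =>
    rw [show ((0:Nat):Int) = 0 from rfl, Sg_zero]
    have : ((pts Y).toFinset.filter (fun γ => nrm γ ≤ (0:Int))) = ∅ := by
      apply Finset.filter_eq_empty_iff.mpr
      intro γ hγ
      rw [List.mem_toFinset, mem_pts hY] at hγ
      omega
    simp [this]
  | succ n ih =>
    rw [show (((n+1:Nat)):Int) = (n:Int) + 1 from by push_cast; ring,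
      Sg_succ _ _ (by omega), ih (by omega), cntD_getD]
    have hsplit : ((pts Y).toFinset.filter (fun γ => nrm γ ≤ (n:Int) + 1))
        = ((pts Y).toFinset.filter (fun γ => nrm γ ≤ (n:Int)))
          ∪ ((pts Y).toFinset.filter (fun γ => nrm γ = (n:Int) + 1)) := by
      rw [← Finset.filter_or]
      apply Finset.filter_congr
      intro γ _
      constructor <;> intro h <;> simp_all <;> omega
    rw [hsplit, Finset.card_union_of_disjoint]
    · have : ((pts Y).countP (fun p => nrm p == ((n:Int) + 1)) : Int)
          = (((pts Y).toFinset.filter (fun γ => nrm γ = (n:Int) + 1)).card : Int) := by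
        rw [countP_card (nodup_pts Y)]
        congr 2
        apply Finset.filter_congr
        intro γ _
        simp
      push_cast
      omega
    · rw [Finset.disjoint_filter]
      intro γ _ h1 h2
      omega

def numRe (α β : Int × Int) : Int := β.1 * α.1 + β.2 * α.2
def numIm (α β : Int × Int) : Int := β.2 * α.1 - β.1 * α.2

lemma card_multiples (Y : Int) (hY : 0 ≤ Y) (α : Int × Int) (hα : 0 < nrm α) :
    ((pts Y).toFinset.filter
        (fun β => decide (nrm α ∣ numRe α β) && decide (nrm α ∣ numIm α β))).card
      = ((pts Y).toFinset.filter (fun γ => nrm γ ≤ Y / nrm α)).card := by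
  set d := nrm α with hd
  have hdpos : 0 < d := hα
  apply Finset.card_bij' (i := fun β _ => ((numRe α β) / d, (numIm α β) / d))
    (j := fun γ _ => (α.1 * γ.1 - α.2 * γ.2, α.1 * γ.2 + α.2 * γ.1))
  · -- hi : image of s lands in t
    intro β hβ
    simp only [Finset.mem_filter, List.mem_toFinset, Bool.and_eq_true, decide_eq_true_iff] at hβ ⊢
    obtain ⟨hmem, hre, him⟩ := hβ
    rw [mem_pts hY] at hmem
    obtain ⟨u, hu⟩ := hre
    obtain ⟨v, hv⟩ := him
    have hu' : numRe α β / d = u := by rw [hu]; exact Int.mul_ediv_cancel_left u (by omega)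
    have hv' : numIm α β / d = v := by rw [hv]; exact Int.mul_ediv_cancel_left v (by omega)
    have hiden : numRe α β * numRe α β + numIm α β * numIm α β = nrm β * d := by
      simp only [numRe, numIm, nrm, hd]; ring
    have hkey : d * (u * u + v * v) = nrm β := by
      have : (d * u) * (d * u) + (d * v) * (d * v) = nrm β * d := by rw [← hu, ← hv]; exact hiden
      nlinarith
    have hγpos : 0 < u * u + v * v := by nlinarith [hmem.1]
    have hγY : (u * u + v * v) * d ≤ Y := by nlinarith [hmem.2]
    rw [mem_pts hY]
    refine ⟨⟨?_, ?_⟩, ?_⟩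
    · simpa [nrm, hu', hv'] using hγpos
    · simp only [nrm, hu', hv']
      nlinarith [hmem.2]
    · simp only [nrm, hu', hv']
      exact (Int.le_ediv_iff_mul_le hdpos).mpr hγY
  · -- hj : image of t lands in s
    intro γ hγ
    simp only [Finset.mem_filter, List.mem_toFinset, Bool.and_eq_true, decide_eq_true_iff] at hγ ⊢
    obtain ⟨hmem, hle⟩ := hγ
    rw [mem_pts hY] at hmem
    have hnb : nrm (α.1 * γ.1 - α.2 * γ.2, α.1 * γ.2 + α.2 * γ.1) = d * nrm γ := by
      simp only [nrm, hd]; ring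
    have hYb : nrm γ * d ≤ Y := (Int.le_ediv_iff_mul_le hdpos).mp hle
    rw [mem_pts hY]
    refine ⟨⟨?_, ?_⟩, ⟨γ.1, ?_⟩, ⟨γ.2, ?_⟩⟩
    · rw [hnb]; nlinarith [hmem.1]
    · rw [hnb]; nlinarith
    · simp only [numRe, hd, nrm]; ring
    · simp only [numIm, hd, nrm]; ring
  · -- left inverse
    intro β hβ
    simp only [Finset.mem_filter, List.mem_toFinset, Bool.and_eq_true, decide_eq_true_iff] at hβ
    obtain ⟨hmem, hre, him⟩ := hβ
    obtain ⟨u, hu⟩ := hre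
    obtain ⟨v, hv⟩ := him
    have hu' : numRe α β / d = u := by rw [hu]; exact Int.mul_ediv_cancel_left u (by omega)
    have hv' : numIm α β / d = v := by rw [hv]; exact Int.mul_ediv_cancel_left v (by omega)
    have h1 : d * (α.1 * u - α.2 * v) = d * β.1 := by
      have e1 : α.1 * (d * u) - α.2 * (d * v) = β.1 * d := by
        rw [← hu, ← hv]; simp only [numRe, numIm, hd, nrm]; ring
      nlinarith
    have h2 : d * (α.1 * v + α.2 * u) = d * β.2 := by
      have e2 : α.1 * (d * v) + α.2 * (d * u) = β.2 * d := by
        rw [← hu, ← hv]; simp only [numRe, numIm, hd, nrm]; ring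
      nlinarith
    have := mul_left_cancel₀ (show d ≠ 0 by omega) h1
    have := mul_left_cancel₀ (show d ≠ 0 by omega) h2
    simp only [hu', hv']
    ext <;> simp <;> omega
  · -- right inverse
    intro γ hγ
    have h1 : numRe α (α.1 * γ.1 - α.2 * γ.2, α.1 * γ.2 + α.2 * γ.1) = d * γ.1 := by
      simp only [numRe, hd, nrm]; ring
    have h2 : numIm α (α.1 * γ.1 - α.2 * γ.2, α.1 * γ.2 + α.2 * γ.1) = d * γ.2 := by
      simp only [numIm, hd, nrm]; ring
    rw [h1, h2, Int.mul_ediv_cancel_left _ (by omega : d ≠ 0),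
      Int.mul_ediv_cancel_left _ (by omega : d ≠ 0)]

def ind (α β : Int × Int) : Int :=
  if nrm α = 0 then 0
  else if PySem.Int.mod (numRe α β) (nrm α) = 0 ∧ PySem.Int.mod (numIm α β) (nrm α) = 0 then 1
  else 0

lemma per_alpha (Y : Int) (hY : 0 ≤ Y) (α : Int × Int) (hα : 0 < nrm α) :
    ((pts Y).map (fun β => ind α β)).sum
      = PySem.List.pyGetD ((PySem.List.pyRange 0 (Y + 1) 1).map (Sg (fun m => (cntD Y).getD m 0)))
          (PySem.Int.floordiv Y (nrm α)) 0 := by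
  have hieq : ∀ β, ind α β
      = if (decide (nrm α ∣ numRe α β) && decide (nrm α ∣ numIm α β)) = true then (1:Int) else 0 := by
    intro β
    unfold ind
    rw [if_neg (by omega)]
    simp only [PySem.Int.mod_eq_zero_iff_dvd]
    by_cases h1 : nrm α ∣ numRe α β <;> by_cases h2 : nrm α ∣ numIm α β <;> simp [h1, h2]
  calc ((pts Y).map (fun β => ind α β)).sum
      = ((pts Y).map (fun β =>
          if (decide (nrm α ∣ numRe α β) && decide (nrm α ∣ numIm α β)) = true then (1:Int) else 0)).sum := by
        exact congrArg List.sum (List.map_congr_left (fun β _ => hieq β))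
    _ = ((pts Y).countP (fun β => decide (nrm α ∣ numRe α β) && decide (nrm α ∣ numIm α β)) : Int) :=
        PySem.List.sum_map_ite_one_zero _ _
    _ = (((pts Y).toFinset.filter
          (fun β => decide (nrm α ∣ numRe α β) && decide (nrm α ∣ numIm α β))).card : Int) :=
        countP_card (nodup_pts Y) _
    _ = (((pts Y).toFinset.filter (fun γ => nrm γ ≤ Y / nrm α)).card : Int) := by
        rw [card_multiples Y hY α hα]
    _ = Sg (fun m => (cntD Y).getD m 0) (Y / nrm α) :=
        (Sg_eq_card Y _ hY (Int.ediv_nonneg hY (le_of_lt hα))).symm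
    _ = _ := by
        rw [PySem.Int.floordiv_eq_ediv_of_pos hα,
          PySem.List.pyGetD_map_pyRange_of_nonneg _ _ _ _ (Int.ediv_nonneg hY (le_of_lt hα))
            (by have := Int.ediv_le_self (nrm α) hY; omega)]

lemma sum_flatMap {α : Type} (l : List α) (g : α → List Int) :
    (l.flatMap g).sum = (l.map (fun a => (g a).sum)).sum := by
  induction l with
  | nil => rfl
  | cons x xs ih => simp [List.flatMap_cons, ih]

lemma sum_filter_ite {α : Type} (l : List α) (p : α → Bool) (g : α → Int) :
    ((l.filter p).map g).sum = (l.map (fun x => if p x then g x else 0)).sum := by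
  induction l with
  | nil => rfl
  | cons x xs ih => by_cases h : p x <;> simp [h, ih]

lemma sum_sum_comm (l1 l2 : List (Int × Int)) (f : Int × Int → Int × Int → Int) :
    (l1.map (fun x => (l2.map (f x)).sum)).sum = (l2.map (fun y => (l1.map (fun x => f x y)).sum)).sum := by
  induction l1 with
  | nil => simp
  | cons x xs ih => simp [ih, List.sum_map_add]


lemma build_eq_pts (m : Int) :
    (PySem.List.pyRange (-(pyIsqrt m)) (pyIsqrt m + 1) 1).foldl (fun acc a =>
      (PySem.List.pyRange (-(pyIsqrt m)) (pyIsqrt m + 1) 1).foldl (fun acc b =>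
        if 0 < a * a + b * b ∧ a * a + b * b ≤ m then acc ++ [(a, b)] else acc) acc) [] = pts m := by
  unfold pts
  have inner : ∀ (a : Int) (acc : List (Int × Int)),
      (PySem.List.pyRange (-(pyIsqrt m)) (pyIsqrt m + 1) 1).foldl (fun acc b =>
        if 0 < a * a + b * b ∧ a * a + b * b ≤ m then acc ++ [(a, b)] else acc) acc
      = acc ++ ((PySem.List.pyRange (-(pyIsqrt m)) (pyIsqrt m + 1) 1).filter
          (fun b => decide (0 < a * a + b * b ∧ a * a + b * b ≤ m))).map (fun b => (a, b)) := by
    intro a acc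
    exact PySem.List.foldl_append_ite _ _ _ _
  calc _ = [] ++ (PySem.List.pyRange (-(pyIsqrt m)) (pyIsqrt m + 1) 1).flatMap (fun a =>
        ((PySem.List.pyRange (-(pyIsqrt m)) (pyIsqrt m + 1) 1).filter
          (fun b => decide (0 < a * a + b * b ∧ a * a + b * b ≤ m))).map (fun b => (a, b))) := by
        rw [← PySem.List.foldl_append_eq_flatMap]
        apply PySem.List.foldl_congr_mem
        intro acc x _
        exact inner x acc
    _ = _ := by simp

-- == assembly ==

lemma sum_pts (m : Int) (h : Int × Int → Int) :
    ((pts m).map h).sum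
      = ((PySem.List.pyRange (-(pyIsqrt m)) (pyIsqrt m + 1) 1).map (fun a =>
          ((PySem.List.pyRange (-(pyIsqrt m)) (pyIsqrt m + 1) 1).map (fun b =>
            if 0 < a * a + b * b ∧ a * a + b * b ≤ m then h (a, b) else 0)).sum)).sum := by
  unfold pts
  rw [List.map_flatMap, sum_flatMap]
  apply congrArg List.sum
  apply List.map_congr_left
  intro a _
  rw [List.map_map, sum_filter_ite]
  apply congrArg List.sum
  apply List.map_congr_left
  intro b _
  by_cases hc : 0 < a * a + b * b ∧ a * a + b * b ≤ m <;> simp [hc]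

theorem gaussian_divisors_bounded_spec' (Y X : Int) (hY : 0 ≤ Y) (hX : 0 ≤ X) :
    gaussian_divisors_bounded Y X = gaussian_divisors_bounded_alt Y X := by
  simp only [gaussian_divisors_bounded, gaussian_divisors_bounded_alt]
  rw [build_eq_pts Y, build_eq_pts X, cnt_build_eq Y, G_eq Y hY]
  -- A's inner loops sum the indicator `ind`
  have hinnerA : ∀ (β : Int × Int) (acc : Int) (l : List (Int × Int)),
      l.foldl (fun lhs α =>
        if α.1 * α.1 + α.2 * α.2 = 0 then lhs
        else if PySem.Int.mod (β.1 * α.1 + β.2 * α.2) (α.1 * α.1 + α.2 * α.2) = 0 ∧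
                PySem.Int.mod (β.2 * α.1 - β.1 * α.2) (α.1 * α.1 + α.2 * α.2) = 0 then lhs + 1
        else lhs) acc
      = acc + (l.map (fun α => ind α β)).sum := by
    intro β acc l
    rw [PySem.List.foldl_congr_mem _ _ (fun lhs α => lhs + ind α β) _ ?_, PySem.List.foldl_add]
    intro acc' α _
    simp only [ind, nrm, numRe, numIm]
    split_ifs <;> omega
  have hlhs : ∀ acc : Int,
      (pts Y).foldl (fun lhs β => (pts X).foldl (fun lhs α =>
        if α.1 * α.1 + α.2 * α.2 = 0 then lhs
        else if PySem.Int.mod (β.1 * α.1 + β.2 * α.2) (α.1 * α.1 + α.2 * α.2) = 0 ∧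
                PySem.Int.mod (β.2 * α.1 - β.1 * α.2) (α.1 * α.1 + α.2 * α.2) = 0 then lhs + 1
        else lhs) lhs) acc
      = acc + ((pts Y).map (fun β => ((pts X).map (fun α => ind α β)).sum)).sum := by
    intro acc
    rw [PySem.List.foldl_congr_mem _ _
      (fun lhs β => lhs + ((pts X).map (fun α => ind α β)).sum) _
      (fun acc' β _ => hinnerA β acc' (pts X)), PySem.List.foldl_add]
  have hrhs : ∀ acc : Int,
      (pts X).foldl (fun rhs α => (pts Y).foldl (fun rhs β =>
        if α.1 * α.1 + α.2 * α.2 = 0 then rhs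
        else if PySem.Int.mod (β.1 * α.1 + β.2 * α.2) (α.1 * α.1 + α.2 * α.2) = 0 ∧
                PySem.Int.mod (β.2 * α.1 - β.1 * α.2) (α.1 * α.1 + α.2 * α.2) = 0 then rhs + 1
        else rhs) rhs) acc
      = acc + ((pts X).map (fun α => ((pts Y).map (fun β => ind α β)).sum)).sum := by
    intro acc
    rw [PySem.List.foldl_congr_mem _ _
      (fun rhs α => rhs + ((pts Y).map (fun β => ind α β)).sum) _ ?_, PySem.List.foldl_add]
    intro acc' α _
    rw [PySem.List.foldl_congr_mem _ _ (fun rhs β => rhs + ind α β) _ ?_, PySem.List.foldl_add]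
    intro acc'' β _
    simp only [ind, nrm, numRe, numIm]
    split_ifs <;> omega
  -- B's loops sum the table lookups
  have hc : ∀ acc : Int,
      (PySem.List.pyRange (-(pyIsqrt X)) (pyIsqrt X + 1) 1).foldl (fun c a =>
        (PySem.List.pyRange (-(pyIsqrt X)) (pyIsqrt X + 1) 1).foldl (fun c b =>
          if 0 < a * a + b * b ∧ a * a + b * b ≤ X then
            c + PySem.List.pyGetD
              ((PySem.List.pyRange 0 (Y + 1) 1).map (Sg (fun m => (cntD Y).getD m 0)),
                Sg (fun m => (cntD Y).getD m 0) Y).1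
              (PySem.Int.floordiv Y (a * a + b * b)) 0
          else c) c) acc
      = acc + ((PySem.List.pyRange (-(pyIsqrt X)) (pyIsqrt X + 1) 1).map (fun a =>
          ((PySem.List.pyRange (-(pyIsqrt X)) (pyIsqrt X + 1) 1).map (fun b =>
            if 0 < a * a + b * b ∧ a * a + b * b ≤ X then
              PySem.List.pyGetD
                ((PySem.List.pyRange 0 (Y + 1) 1).map (Sg (fun m => (cntD Y).getD m 0)))
                (PySem.Int.floordiv Y (a * a + b * b)) 0
            else 0)).sum)).sum := by
    intro acc
    rw [PySem.List.foldl_congr_mem _ _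
      (fun c a => c + ((PySem.List.pyRange (-(pyIsqrt X)) (pyIsqrt X + 1) 1).map (fun b =>
        if 0 < a * a + b * b ∧ a * a + b * b ≤ X then
          PySem.List.pyGetD
            ((PySem.List.pyRange 0 (Y + 1) 1).map (Sg (fun m => (cntD Y).getD m 0)))
            (PySem.Int.floordiv Y (a * a + b * b)) 0
        else 0)).sum) _ ?_, PySem.List.foldl_add]
    intro acc' a _
    rw [PySem.List.foldl_congr_mem _ _
      (fun c b => c + (if 0 < a * a + b * b ∧ a * a + b * b ≤ X then
        PySem.List.pyGetD
          ((PySem.List.pyRange 0 (Y + 1) 1).map (Sg (fun m => (cntD Y).getD m 0)))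
          (PySem.Int.floordiv Y (a * a + b * b)) 0
        else 0)) _ ?_, PySem.List.foldl_add]
    intro acc'' b _
    by_cases hP : 0 < a * a + b * b ∧ a * a + b * b ≤ X <;> simp [hP]
  rw [hlhs 0, hrhs 0, hc 0, zero_add, zero_add, zero_add]
  -- the common value: lhs = rhs by the summation swap, rhs = c by per_alpha + sum_pts
  have hswap := sum_sum_comm (pts Y) (pts X) (fun β α => ind α β)
  have hper : ((pts X).map (fun α => ((pts Y).map (fun β => ind α β)).sum)).sum
      = ((pts X).map (fun α =>
          PySem.List.pyGetD ((PySem.List.pyRange 0 (Y + 1) 1).map (Sg (fun m => (cntD Y).getD m 0)))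
            (PySem.Int.floordiv Y (nrm α)) 0)).sum := by
    apply congrArg List.sum
    apply List.map_congr_left
    intro α hα
    exact per_alpha Y hY α ((mem_pts hX α).mp hα).1
  have hpts := sum_pts X (fun α =>
    PySem.List.pyGetD ((PySem.List.pyRange 0 (Y + 1) 1).map (Sg (fun m => (cntD Y).getD m 0)))
      (PySem.Int.floordiv Y (nrm α)) 0)
  rw [hswap, hper, hpts]
  simp [nrm]

-- ===== VERDICT (by name: the statement is the Claim_ definition above) =====
theorem gaussian_divisors_bounded_spec : Claim_equal_gaussian_divisors_bounded := by
  intro Y X _ hpre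
  exact gaussian_divisors_bounded_spec' Y X hpre.1 hpre.2
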